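-- pv_equiv track=rewrite | github.com/hikingout/2023-AdventofCode | aoc23_12_01_P2.py | find_right_number
-- ===== SOURCE A (Python) =====
-- def find_right_number(line, number_dict):
--     reversed_line = line[::-1]
--     for start_idx in range(len(reversed_line)):
--         for end_idx in range(start_idx + 1, len(reversed_line) + 1):
--             substring = reversed_line[start_idx:end_idx]
--             if substring[::-1] in number_dict: # Check the normal order of the substring in the dictionary
--                 return number_dict[substring[::-1]]
--     return None
-- ===== SOURCE B (Python) =====
-- def find_right_number(line, number_dict):
--     # Different algorithm: loop once over the dictionary entries instead of over
--     # substring positions.  Each key is ranked by the leftmost occurrence of its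
--     # reversal in the reversed line (= the key's rightmost occurrence in the
--     # line); the entry with the lexicographically smallest (position, key
--     # length) rank is A's first hit.  Once a best rank (p, L) is known, a later
--     # key can only beat it by occurring no later than p, so only the prefix
--     # rev[: p + len(key)] needs to be searched.
--     rev = line[::-1]
--     best = None  # ((start in rev, key length), value)
--     for key, value in number_dict.items():
--         if key:
--             krev = key[::-1]
--             if best is None:
--                 s = rev.find(krev)
--                 if s >= 0:
--                     best = ((s, len(key)), value)
--             else:
--                 p, L = best[0]
--                 s = rev[: p + len(krev)].find(krev)
--                 if s >= 0 and (s, len(key)) < (p, L):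
--                     best = ((s, len(key)), value)
--     return None if best is None else best[1]
-- ===== Notes on version B (the rewrite author's own statement) =====
-- stated objective: alternative
-- what changed: A enumerates substrings of the reversed line by start and end position and returns the first dictionary hit; B instead loops once over the dictionary entries, ranks each key by the leftmost occurrence of its reversal in the reversed line (= the key's rightmost occurrence), keeps the entry with the lexicographically smallest (position, key-length) rank, and prunes later searches to the prefix of the reversed line that could still beat the current best.
import Mathlib
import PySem

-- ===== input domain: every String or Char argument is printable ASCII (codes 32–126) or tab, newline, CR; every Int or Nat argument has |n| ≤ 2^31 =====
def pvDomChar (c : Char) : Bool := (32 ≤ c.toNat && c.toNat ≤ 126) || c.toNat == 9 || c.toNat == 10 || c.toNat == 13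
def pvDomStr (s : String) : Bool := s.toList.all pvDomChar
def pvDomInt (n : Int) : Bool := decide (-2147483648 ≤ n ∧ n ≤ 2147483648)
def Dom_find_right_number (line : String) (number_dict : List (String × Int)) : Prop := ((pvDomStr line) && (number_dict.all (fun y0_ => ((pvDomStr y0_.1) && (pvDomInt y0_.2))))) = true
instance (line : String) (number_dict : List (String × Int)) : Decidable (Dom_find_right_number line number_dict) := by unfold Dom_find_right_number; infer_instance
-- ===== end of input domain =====

-- B replaces A's scan over substring start/end positions by a single loop over the
-- dictionary entries: each key is ranked by the leftmost occurrence of its reversal in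
-- the reversed line (its rightmost occurrence in the line), and the entry with the
-- lexicographically smallest (position, key length) rank wins; same return value.

-- ===== PORT A =====
-- inner loop: 'for end_idx in range(start_idx+1, len+1): …'; Python's
-- 'if substring[::-1] in number_dict: return number_dict[substring[::-1]]' is ported as a
-- match on the dict lookup: membership holds iff get? is some, and the value returned is that get?.
def pyA_inner (rev : List Char) (nd : List (String × Int)) (s : Int) : List Int → Option Int
  | [] => none
  | e :: rest =>
    let substring := PySem.List.slice rev (some s) (some e)
    match PySem.Dict.get? ⟨nd⟩ (String.ofList substring.reverse) with
    | some v => some v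
    | none => pyA_inner rev nd s rest

-- outer loop: 'for start_idx in range(len(reversed_line)): …'
def pyA_outer (rev : List Char) (nd : List (String × Int)) : List Int → Option Int
  | [] => none
  | s :: rest =>
    match pyA_inner rev nd s (PySem.List.pyRange (s + 1) ((rev.length : Int) + 1) 1) with
    | some v => some v
    | none => pyA_outer rev nd rest

def find_right_number (line : String) (number_dict : List (String × Int)) : Option Int :=
  let reversed_line := line.toList.reverse  -- line[::-1]
  pyA_outer reversed_line number_dict (PySem.List.pyRange 0 (reversed_line.length : Int) 1)

-- ===== PORT B =====
-- loop body: 'if key: krev = key[::-1]; if best is None: s = rev.find(krev); if s >= 0: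
--   best = ((s, len(key)), value)
-- else: p, L = best[0]; s = rev[: p + len(krev)].find(krev);
--   if s >= 0 and (s, len(key)) < (p, L): best = ((s, len(key)), value)'
-- (str.find is PySem.Chars.find on the character lists (Str.find_eq); the slice
--  rev[:m] is PySem.List.slice rev none (some m); Python's tuple '<' on int pairs
--  is the explicit lexicographic test below)
def pyB_step (rev : List Char) (best : Option ((Int × Int) × Int)) (e : String × Int) :
    Option ((Int × Int) × Int) :=
  if e.1.toList = [] then best   -- 'if key:' — an empty key is skipped
  else
    let krev := e.1.toList.reverse
    match best with
    | none =>
      let s := PySem.Chars.find rev krev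
      if 0 ≤ s then some ((s, (e.1.toList.length : Int)), e.2) else none
    | some (r, v) =>
      let s := PySem.Chars.find (PySem.List.slice rev none (some (r.1 + (krev.length : Int)))) krev
      if 0 ≤ s ∧ (s < r.1 ∨ (s = r.1 ∧ (e.1.toList.length : Int) < r.2)) then
        some ((s, (e.1.toList.length : Int)), e.2)
      else some (r, v)

def find_right_number_alt (line : String) (number_dict : List (String × Int)) : Option Int :=
  let rev := line.toList.reverse  -- line[::-1]
  match number_dict.foldl (pyB_step rev) none with
  | none => none
  | some (_, v) => some v

-- ===== PRECONDITION & SPEC =====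
def Spec_find_right_number (line : String) (number_dict : List (String × Int)) (out : Option Int) : Prop := out = find_right_number_alt line number_dict
instance (line : String) (number_dict : List (String × Int)) (out : Option Int) : Decidable (Spec_find_right_number line number_dict out) := by unfold Spec_find_right_number; infer_instance

-- ===== CLAIM (what is proved, stated in full; the proofs are below) =====
def Claim_equal_find_right_number : Prop := ∀ (line : String) (number_dict : List (String × Int)), Dom_find_right_number line number_dict → Spec_find_right_number line number_dict (find_right_number line number_dict)

-- ===== LEMMAS AND PROOFS =====

-- B's loop as a left-biased minimum: 'better old new' keeps the better-ranked candidate,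
-- the earlier one (old) on ties.
def better (old new : Option ((Int × Int) × Int)) : Option ((Int × Int) × Int) :=
  match old, new with
  | none, x => x
  | some o, none => some o
  | some o, some c =>
    if c.1.1 < o.1.1 ∨ (c.1.1 = o.1.1 ∧ c.1.2 < o.1.2) then some c else some o

-- the candidate a single entry contributes
def cand (rev : List Char) (e : String × Int) : Option ((Int × Int) × Int) :=
  pyB_step rev none e

-- the rank of a key alone
def candKey (rev : List Char) (k : String) : Option (Int × Int) :=
  if k.toList = [] then none
  else
    let s := PySem.Chars.find rev k.toList.reverse
    if 0 ≤ s then some (s, (k.toList.length : Int)) else none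

def bfold (rev : List Char) (l : List (String × Int)) : Option ((Int × Int) × Int) :=
  l.foldl (pyB_step rev) none

theorem better_some_none (o : (Int × Int) × Int) : better (some o) none = some o := rfl

theorem better_some_some' (p L v f len w : Int) :
    better (some ((p, L), v)) (some ((f, len), w)) =
      if f < p ∨ (f = p ∧ len < L) then some ((f, len), w) else some ((p, L), v) := rfl

theorem better_some_some (o c : (Int × Int) × Int) :
    better (some o) (some c) =
      if c.1.1 < o.1.1 ∨ (c.1.1 = o.1.1 ∧ c.1.2 < o.1.2) then some c else some o := rfl

theorem find_le_of_prefix_drop (rev sub : List Char) (j : Nat) (h : sub <+: rev.drop j) :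
    PySem.Chars.find rev sub ≤ (j : Int) := by
  have h0 : 0 ≤ PySem.Chars.find rev sub := by
    rw [PySem.Chars.find_nonneg_iff]
    exact (List.IsPrefix.isInfix h).trans (List.drop_suffix j rev).isInfix
  obtain ⟨_, hmin⟩ := PySem.Chars.find_spec h0
  by_contra hlt
  exact hmin j (by omega) h

-- find restricted to a prefix: where it succeeds it agrees with find on the whole list
theorem find_take_eq (rev krev : List Char) (mN : Nat)
    (h : 0 ≤ PySem.Chars.find (rev.take mN) krev) :
    PySem.Chars.find (rev.take mN) krev = PySem.Chars.find rev krev ∧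
      (PySem.Chars.find (rev.take mN) krev).toNat + krev.length ≤ mN := by
  obtain ⟨hpre, hmin⟩ := PySem.Chars.find_spec h
  rw [List.drop_take] at hpre
  have hocc : krev <+: rev.drop (PySem.Chars.find (rev.take mN) krev).toNat :=
    (List.prefix_take_iff.mp hpre).1
  have hlenle : krev.length ≤ mN - (PySem.Chars.find (rev.take mN) krev).toNat :=
    (List.prefix_take_iff.mp hpre).2
  have hfwle : PySem.Chars.find (rev.take mN) krev ≤ ((rev.take mN).length : Int) :=
    PySem.Chars.find_le_length _ _
  have htk : (rev.take mN).length ≤ mN := by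
    rw [List.length_take]; omega
  have hf0 : 0 ≤ PySem.Chars.find rev krev := by
    rw [PySem.Chars.find_nonneg_iff]
    exact (List.IsPrefix.isInfix hocc).trans (List.drop_suffix _ rev).isInfix
  have hfle := find_le_of_prefix_drop rev krev _ hocc
  have hoccf := (PySem.Chars.find_spec hf0).1
  have hin : krev <+: (rev.take mN).drop (PySem.Chars.find rev krev).toNat := by
    rw [List.drop_take, List.prefix_take_iff]
    exact ⟨hoccf, by omega⟩
  have hnlt : ¬ ((PySem.Chars.find rev krev).toNat <
      (PySem.Chars.find (rev.take mN) krev).toNat) := fun hlt => hmin _ hlt hin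
  constructor <;> omega

-- find restricted to a prefix: where it fails, the whole-list occurrence (if any) is too far right
theorem find_take_neg (rev krev : List Char) (mN : Nat)
    (h : ¬ 0 ≤ PySem.Chars.find (rev.take mN) krev)
    (hf : 0 ≤ PySem.Chars.find rev krev)
    (hle : (PySem.Chars.find rev krev).toNat + krev.length ≤ mN) : False := by
  have hoccf := (PySem.Chars.find_spec hf).1
  have hin : krev <+: (rev.take mN).drop (PySem.Chars.find rev krev).toNat := by
    rw [List.drop_take, List.prefix_take_iff]
    exact ⟨hoccf, by omega⟩
  exact h (by
    rw [PySem.Chars.find_nonneg_iff]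
    exact (List.IsPrefix.isInfix hin).trans (List.drop_suffix _ _).isInfix)

theorem step_better (rev : List Char) (best : Option ((Int × Int) × Int)) (e : String × Int)
    (hok : ∀ x, best = some x → 0 ≤ x.1.1) :
    pyB_step rev best e = better best (cand rev e) := by
  rcases best with _ | ⟨⟨p, L⟩, v⟩
  · rfl
  · have hp : 0 ≤ p := hok ((p, L), v) rfl
    by_cases h1 : e.1.toList = []
    · simp [pyB_step, cand, better, h1]
    · have hm0 : (0 : Int) ≤ p + (e.1.toList.reverse.length : Int) := by
        have : (0 : Int) ≤ (e.1.toList.reverse.length : Int) := Int.natCast_nonneg _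
        omega
      have hslice : PySem.List.slice rev none (some (p + (e.1.toList.reverse.length : Int)))
          = rev.take (p + (e.1.toList.reverse.length : Int)).toNat :=
        PySem.List.slice_to rev hm0
      set mN := (p + (e.1.toList.reverse.length : Int)).toNat with hmN
      by_cases hfw : 0 ≤ PySem.Chars.find (rev.take mN) e.1.toList.reverse
      · obtain ⟨hfeq, hfl⟩ := find_take_eq rev e.1.toList.reverse mN hfw
        have hf : 0 ≤ PySem.Chars.find rev e.1.toList.reverse := hfeq ▸ hfw
        simp only [pyB_step, cand, if_neg h1, hslice, hfeq, if_pos hf, better_some_some']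
        split_ifs with ha hb hb <;> first | rfl | (exfalso; omega)
      · by_cases hf : 0 ≤ PySem.Chars.find rev e.1.toList.reverse
        · have hgt : p < PySem.Chars.find rev e.1.toList.reverse := by
            by_contra hcon
            exact find_take_neg rev e.1.toList.reverse mN hfw hf (by omega)
          simp only [pyB_step, cand, if_neg h1, hslice, if_pos hf, better_some_some']
          split_ifs with ha hb <;>
            first | rfl | (exfalso; exact hfw ha.1) | (exfalso; omega)
        · simp only [pyB_step, cand, if_neg h1, hslice, if_neg hf, better_some_none]
          rw [if_neg (fun hcon => hfw hcon.1)]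

theorem better_none_left (x : Option ((Int × Int) × Int)) : better none x = x := rfl

theorem better_assoc (a b c : Option ((Int × Int) × Int)) :
    better (better a b) c = better a (better b c) := by
  cases a with
  | none => rfl
  | some oa =>
    cases b with
    | none => rfl
    | some ob =>
      cases c with
      | none => simp only [better]; split_ifs <;> rfl
      | some oc =>
        simp only [better]
        split_ifs <;> first | rfl | (exfalso; omega) |
          (simp only [better]; split_ifs <;> first | rfl | (exfalso; omega))

theorem cand_ok (rev : List Char) (e : String × Int) :
    ∀ x, cand rev e = some x → 0 ≤ x.1.1 := by
  intro x h
  by_cases h1 : e.1.toList = []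
  · simp [cand, pyB_step, h1] at h
  · simp only [cand, pyB_step, if_neg h1] at h
    split_ifs at h with h2
    cases h; exact h2

theorem better_ok (a b : Option ((Int × Int) × Int))
    (ha : ∀ x, a = some x → 0 ≤ x.1.1) (hb : ∀ x, b = some x → 0 ≤ x.1.1) :
    ∀ x, better a b = some x → 0 ≤ x.1.1 := by
  cases a with
  | none => rw [better_none_left]; exact hb
  | some o =>
    cases b with
    | none => rw [better_some_none]; exact ha
    | some c =>
      rw [better_some_some]
      intro x h
      split_ifs at h
      · cases h; exact hb c rfl
      · cases h; exact ha o rfl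

theorem foldl_better (rev : List Char) (l : List (String × Int)) :
    ∀ st, (∀ x, st = some x → 0 ≤ x.1.1) →
      l.foldl (pyB_step rev) st = better st (bfold rev l) := by
  induction l with
  | nil => intro st _; cases st <;> rfl
  | cons e l ih =>
    intro st hst
    have hok' : ∀ x, pyB_step rev st e = some x → 0 ≤ x.1.1 := by
      rw [step_better rev st e hst]
      exact better_ok st (cand rev e) hst (cand_ok rev e)
    have hokn : ∀ x, pyB_step rev none e = some x → 0 ≤ x.1.1 := by
      rw [step_better rev none e (fun x hx => nomatch hx), better_none_left]
      exact cand_ok rev e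
    show (l.foldl (pyB_step rev) (pyB_step rev st e)) = better st (bfold rev (e :: l))
    have hbf : bfold rev (e :: l) = l.foldl (pyB_step rev) (pyB_step rev none e) := rfl
    rw [hbf, ih _ hok', ih _ hokn, step_better rev st e hst,
      step_better rev none e (fun x hx => nomatch hx), better_none_left, better_assoc]

theorem bfold_cons (rev : List Char) (e : String × Int) (l : List (String × Int)) :
    bfold rev (e :: l) = better (cand rev e) (bfold rev l) := by
  have hokn : ∀ x, pyB_step rev none e = some x → 0 ≤ x.1.1 := by
    rw [step_better rev none e (fun x hx => nomatch hx), better_none_left]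
    exact cand_ok rev e
  show l.foldl (pyB_step rev) (pyB_step rev none e) = _
  rw [foldl_better rev l _ hokn, step_better rev none e (fun x hx => nomatch hx),
    better_none_left]

theorem bfold_mem (rev : List Char) (l : List (String × Int)) :
    ∀ x, bfold rev l = some x → ∃ e ∈ l, cand rev e = some x := by
  induction l with
  | nil => intro x h; exact absurd h (by simp [bfold])
  | cons e l ih =>
    intro x h
    rw [bfold_cons] at h
    cases hc : cand rev e with
    | none =>
      rw [hc, better_none_left] at h
      obtain ⟨e', he', hx⟩ := ih x h
      exact ⟨e', List.mem_cons_of_mem _ he', hx⟩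
    | some c =>
      cases hb : bfold rev l with
      | none =>
        rw [hc, hb] at h
        exact ⟨e, List.mem_cons_self, by rw [hc]; rw [← h]; rfl⟩
      | some b =>
        rw [hc, hb] at h
        simp only [better] at h
        split_ifs at h
        · obtain ⟨e', he', hx⟩ := ih b hb
          exact ⟨e', List.mem_cons_of_mem _ he', by rw [hx, h]⟩
        · exact ⟨e, List.mem_cons_self, by rw [hc, h]⟩

theorem cand_eq (rev : List Char) (e : String × Int) :
    cand rev e = (candKey rev e.1).map (fun r => (r, e.2)) := by
  simp only [cand, pyB_step, candKey]
  split_ifs <;> rfl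

theorem cand_some (rev : List Char) (e : String × Int) (x : (Int × Int) × Int)
    (h : cand rev e = some x) : candKey rev e.1 = some x.1 ∧ x.2 = e.2 := by
  rw [cand_eq] at h
  cases hc : candKey rev e.1 with
  | none => rw [hc] at h; simp at h
  | some r => rw [hc] at h; simp at h; exact ⟨by rw [← h], by rw [← h]⟩

-- facts about candKey
theorem candKey_some (rev : List Char) (k : String) (r : Int × Int)
    (h : candKey rev k = some r) :
    k.toList ≠ [] ∧ r.1 = PySem.Chars.find rev k.toList.reverse ∧ 0 ≤ r.1 ∧
      r.2 = (k.toList.length : Int) := by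
  simp only [candKey] at h
  split_ifs at h with h1 h2
  · cases h; exact ⟨h1, rfl, h2, rfl⟩

-- a ranked key's reversal is the prefix of rev at the rank's position
theorem candKey_prefix (rev : List Char) (k : String) (r : Int × Int)
    (h : candKey rev k = some r) : k.toList.reverse <+: rev.drop r.1.toNat := by
  obtain ⟨_, hf, h0, _⟩ := candKey_some rev k r h
  have := (PySem.Chars.find_spec (s := rev) (sub := k.toList.reverse) (by omega)).1
  rwa [← hf] at this

theorem candKey_fst_lt (rev : List Char) (k : String) (r : Int × Int)
    (h : candKey rev k = some r) : r.1 < (rev.length : Int) := by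
  obtain ⟨hne, hf, h0, _⟩ := candKey_some rev k r h
  have hp := candKey_prefix rev k r h
  have hlen := hp.length_le
  rw [List.length_reverse, List.length_drop] at hlen
  have hk : 0 < k.toList.length := List.length_pos_iff.mpr hne
  have hle : PySem.Chars.find rev k.toList.reverse ≤ (rev.length : Int) :=
    PySem.Chars.find_le_length rev k.toList.reverse
  omega

theorem candKey_snd_le (rev : List Char) (k : String) (r : Int × Int)
    (h : candKey rev k = some r) : r.2 ≤ (rev.length : Int) - r.1 := by
  obtain ⟨hne, hf, h0, hsnd⟩ := candKey_some rev k r h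
  have hp := candKey_prefix rev k r h
  have hlen := hp.length_le
  rw [List.length_reverse, List.length_drop] at hlen
  have hle : PySem.Chars.find rev k.toList.reverse ≤ (rev.length : Int) :=
    PySem.Chars.find_le_length rev k.toList.reverse
  omega

-- the rank determines the key: it is the reversed prefix of rev at that position
theorem candKey_key (rev : List Char) (k : String) (s0 len0 : Nat)
    (h : candKey rev k = some ((s0 : Int), (len0 : Int))) :
    k.toList = ((rev.drop s0).take len0).reverse := by
  have hp := candKey_prefix rev k _ h
  obtain ⟨_, _, _, hsnd⟩ := candKey_some rev k _ h
  simp only at hsnd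
  have hlen : k.toList.reverse.length = len0 := by
    rw [List.length_reverse]; exact_mod_cast hsnd.symm
  have := List.prefix_iff_eq_take.mp hp
  rw [hlen, Int.toNat_natCast] at this
  rw [← List.reverse_reverse k.toList, this]

-- first dict hit over a list of candidate keys (A's loops reduce to this)
def hitKeys (nd : List (String × Int)) : List (List Char) → Option Int
  | [] => none
  | k :: rest =>
    match PySem.Dict.get? ⟨nd⟩ (String.ofList k) with
    | some v => some v
    | none => hitKeys nd rest

theorem pyA_inner_eq_hitKeys (rev : List Char) (nd : List (String × Int)) (s : Int)
    (l : List Int) :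
    pyA_inner rev nd s l =
      hitKeys nd (l.map (fun e => (PySem.List.slice rev (some s) (some e)).reverse)) := by
  induction l with
  | nil => rfl
  | cons e rest ih => simp only [pyA_inner, hitKeys, List.map_cons, ih]

theorem hitKeys_none (nd : List (String × Int)) (l : List (List Char))
    (h : ∀ k ∈ l, PySem.Dict.get? ⟨nd⟩ (String.ofList k) = none) : hitKeys nd l = none := by
  induction l with
  | nil => rfl
  | cons k rest ih =>
    simp only [hitKeys, h k List.mem_cons_self]
    exact ih (fun k' hk' => h k' (List.mem_cons_of_mem _ hk'))

-- dict lookup vs membership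
theorem get?_mem (nd : List (String × Int)) (k : String) (v : Int)
    (h : PySem.Dict.get? ⟨nd⟩ k = some v) : (k, v) ∈ nd := by
  induction nd with
  | nil => exact absurd h (by simp [PySem.Dict.get?])
  | cons p rest ih =>
    rw [PySem.Dict.get?_mk_cons] at h
    split_ifs at h with hb
    · cases h; exact (by rw [← eq_of_beq hb]; exact List.mem_cons_self)
    · exact List.mem_cons_of_mem _ (ih h)

theorem mem_get? (nd : List (String × Int)) (k : String) (v : Int)
    (h : (k, v) ∈ nd) : ∃ v', PySem.Dict.get? ⟨nd⟩ k = some v' := by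
  induction nd with
  | nil => cases h
  | cons p rest ih =>
    rw [PySem.Dict.get?_mk_cons]
    by_cases hb : (p.1 == k) = true
    · exact ⟨p.2, by rw [if_pos hb]⟩
    · rw [if_neg hb]
      rcases List.mem_cons.mp h with h | h
      · exact absurd (by rw [← h]; simp : (p.1 == k) = true) hb
      · exact ih h

-- B computes the first entry of minimal rank: if k0 has the minimal rank r0, every
-- minimal-rank entry carries key k0, and get? nd k0 = some v, then the fold yields (r0, v).
theorem bfold_min (rev : List Char) (k0 : String) (r0 : Int × Int)
    (hk0 : candKey rev k0 = some r0) :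
    ∀ nd : List (String × Int),
    (∀ e ∈ nd, ∀ r, candKey rev e.1 = some r →
        r0.1 < r.1 ∨ (r0.1 = r.1 ∧ r0.2 ≤ r.2)) →
    (∀ e ∈ nd, candKey rev e.1 = some r0 → e.1 = k0) →
    ∀ v, PySem.Dict.get? ⟨nd⟩ k0 = some v → bfold rev nd = some (r0, v) := by
  intro nd
  induction nd with
  | nil => intro _ _ v hv; exact absurd hv (by simp [PySem.Dict.get?])
  | cons e l ih =>
    intro h1 h2 v hv
    rw [PySem.Dict.get?_mk_cons] at hv
    rw [bfold_cons]
    by_cases hb : (e.1 == k0) = true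
    · rw [if_pos hb] at hv
      cases hv
      have hkey : e.1 = k0 := eq_of_beq hb
      have hce : cand rev e = some (r0, e.2) := by
        rw [cand_eq, hkey, hk0]; rfl
      rw [hce]
      cases hbl : bfold rev l with
      | none => rfl
      | some x =>
        obtain ⟨e', he', hx⟩ := bfold_mem rev l x hbl
        obtain ⟨hck, _⟩ := cand_some rev e' x hx
        have := h1 e' (List.mem_cons_of_mem _ he') x.1 hck
        simp only [better]
        rw [if_neg (by omega)]
    · rw [if_neg hb] at hv
      have hrec := ih (fun e' he' => h1 e' (List.mem_cons_of_mem _ he'))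
        (fun e' he' => h2 e' (List.mem_cons_of_mem _ he')) v hv
      rw [hrec]
      cases hc : cand rev e with
      | none => rfl
      | some c =>
        obtain ⟨hck, _⟩ := cand_some rev e c hc
        have hne : c.1 ≠ r0 := by
          intro hcr
          rw [hcr] at hck
          exact hb (beq_iff_eq.mpr (h2 e List.mem_cons_self hck))
        have hle := h1 e List.mem_cons_self c.1 hck
        have : r0.1 < c.1.1 ∨ (r0.1 = c.1.1 ∧ r0.2 < c.1.2) := by
          rcases hle with h | ⟨h, h'⟩
          · exact Or.inl h
          · refine Or.inr ⟨h, lt_of_le_of_ne h' ?_⟩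
            intro hh
            exact hne (Prod.ext h hh).symm
        simp only [better]
        rw [if_pos (by omega)]

theorem better_eq_none (a b : Option ((Int × Int) × Int)) :
    better a b = none ↔ a = none ∧ b = none := by
  cases a with
  | none => cases b <;> simp [better]
  | some o => cases b with
    | none => simp [better]
    | some c => simp only [better]; split_ifs <;> simp

theorem bfold_ne_none (rev : List Char) (nd : List (String × Int)) (e : String × Int)
    (he : e ∈ nd) (c : (Int × Int) × Int) (hc : cand rev e = some c) :
    bfold rev nd ≠ none := by
  induction nd with
  | nil => cases he
  | cons e' l ih =>
    rw [bfold_cons]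
    intro hcontra
    obtain ⟨ha, hb⟩ := (better_eq_none _ _).mp hcontra
    rcases List.mem_cons.mp he with h | h
    · rw [← h, hc] at ha; cases ha
    · exact ih h hb

-- the key A tests at outer position s0, inner length len0
theorem slice_key (rev : List Char) (s0 len0 : Nat) :
    PySem.List.slice rev (some (s0 : Int)) (some ((s0 : Int) + (len0 : Int))) =
      (rev.drop s0).take len0 := PySem.List.slice_natCast_add rev s0 len0

-- one row of A (outer position s0, lengths from len0 up), assuming no shorter length at
-- s0 ranks any key and some key does rank at s0, equals B's fold
theorem row_loop (rev : List Char) (nd : List (String × Int)) (s0 : Nat)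
    (hs : s0 < rev.length)
    (H : ∀ e ∈ nd, ∀ r, candKey rev e.1 = some r → (s0 : Int) ≤ r.1) :
    ∀ cnt len0, 1 ≤ len0 → len0 + cnt = rev.length - s0 + 1 →
    (∀ e ∈ nd, ∀ r, candKey rev e.1 = some r → r.1 = (s0 : Int) → (len0 : Int) ≤ r.2) →
    (∃ e ∈ nd, ∃ r, candKey rev e.1 = some r ∧ r.1 = (s0 : Int)) →
    hitKeys nd ((PySem.List.pyRange ((s0 : Int) + (len0 : Int)) ((rev.length : Int) + 1) 1).map
        (fun e => (PySem.List.slice rev (some (s0 : Int)) (some e)).reverse)) =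
      (bfold rev nd).map (·.2) := by
  intro cnt
  induction cnt with
  | zero =>
    intro len0 h1 hsum Hlen ⟨e, he, r, hr, hr1⟩
    exfalso
    have := Hlen e he r hr hr1
    have := candKey_snd_le rev e.1 r hr
    omega
  | succ cnt ih =>
    intro len0 h1 hsum Hlen Hex
    rw [PySem.List.pyRange_one_cons (by omega), List.map_cons]
    simp only [hitKeys]
    rw [slice_key rev s0 len0]
    set k0 : String := String.ofList ((rev.drop s0).take len0).reverse with hk0def
    cases hg : PySem.Dict.get? ⟨nd⟩ k0 with
    | some v =>
      -- first hit: the dict contains the key of length len0 ending here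
      have hmem := get?_mem nd k0 v hg
      have hlenk : k0.toList = ((rev.drop s0).take len0).reverse := String.toList_ofList
      have hklen : k0.toList.length = len0 := by
        rw [hlenk, List.length_reverse, List.length_take, List.length_drop]
        omega
      have hkne : k0.toList ≠ [] := by
        intro h; rw [h] at hklen; simp at hklen; omega
      have hprefix : k0.toList.reverse <+: rev.drop s0 := by
        rw [hlenk, List.reverse_reverse]
        exact List.take_prefix _ _
      have hfle : PySem.Chars.find rev k0.toList.reverse ≤ (s0 : Int) :=
        find_le_of_prefix_drop rev _ s0 hprefix
      have hf0 : 0 ≤ PySem.Chars.find rev k0.toList.reverse := by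
        rw [PySem.Chars.find_nonneg_iff]
        exact (List.IsPrefix.isInfix hprefix).trans (List.drop_suffix s0 rev).isInfix
      have hck : candKey rev k0 =
          some (PySem.Chars.find rev k0.toList.reverse, (k0.toList.length : Int)) := by
        simp only [candKey, if_neg hkne, if_pos hf0]
      have hfge := H (k0, v) hmem _ hck
      simp only at hfge
      have hfeq : PySem.Chars.find rev k0.toList.reverse = (s0 : Int) := le_antisymm hfle hfge
      have hr0 : candKey rev k0 = some ((s0 : Int), (len0 : Int)) := by
        rw [hck, hfeq, hklen]
      have hbf := bfold_min rev k0 ((s0 : Int), (len0 : Int)) hr0 nd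
        (fun e he r hr => by
          have hge := H e he r hr
          by_cases h : r.1 = (s0 : Int)
          · exact Or.inr ⟨h.symm, Hlen e he r hr h⟩
          · exact Or.inl (by simp only; omega))
        (fun e he hr => by
          have := candKey_key rev e.1 s0 len0 hr
          apply String.toList_inj.mp
          rw [this, hlenk])
        v hg
      rw [hbf]
      rfl
    | none =>
      -- no key of length len0 here: lengths len0 are impossible, recurse at len0+1
      have hcast : (s0 : Int) + (len0 : Int) + 1 = (s0 : Int) + ((len0 + 1 : Nat) : Int) := by
        push_cast; ring
      rw [hcast]
      apply ih (len0 + 1) (by omega) (by omega)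
      · intro e he r hr hr1
        have hge := Hlen e he r hr hr1
        by_cases hlen : r.2 = (len0 : Int)
        · exfalso
          have hkey : e.1.toList = ((rev.drop s0).take len0).reverse := by
            have : candKey rev e.1 = some ((s0 : Int), (len0 : Int)) := by
              rw [hr, ← hr1, ← hlen]
            exact candKey_key rev e.1 s0 len0 this
          have he1 : e.1 = k0 := String.toList_inj.mp (by rw [hkey, String.toList_ofList])
          obtain ⟨v', hv'⟩ := mem_get? nd k0 e.2 (by rw [← he1]; exact he)
          rw [hv'] at hg; cases hg
        · omega
      · exact Hex

-- A's outer loop from position s0, assuming no key ranks before s0, equals B's fold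
theorem outer_loop (rev : List Char) (nd : List (String × Int)) :
    ∀ d s0, s0 + d = rev.length →
    (∀ e ∈ nd, ∀ r, candKey rev e.1 = some r → (s0 : Int) ≤ r.1) →
    pyA_outer rev nd (PySem.List.pyRange (s0 : Int) (rev.length : Int) 1) =
      (bfold rev nd).map (·.2) := by
  intro d
  induction d with
  | zero =>
    intro s0 hsum H
    rw [PySem.List.pyRange_one_eq_nil (by omega)]
    cases hb : bfold rev nd with
    | none => rfl
    | some x =>
      exfalso
      obtain ⟨e, he, hx⟩ := bfold_mem rev nd x hb
      obtain ⟨hck, _⟩ := cand_some rev e x hx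
      have := H e he x.1 hck
      have := candKey_fst_lt rev e.1 x.1 hck
      omega
  | succ d ih =>
    intro s0 hsum H
    rw [PySem.List.pyRange_one_cons (by omega)]
    simp only [pyA_outer]
    rw [pyA_inner_eq_hitKeys]
    by_cases hex : ∃ e ∈ nd, ∃ r, candKey rev e.1 = some r ∧ r.1 = (s0 : Int)
    · -- some key's rightmost occurrence ends here: the row finds it
      have hrow := row_loop rev nd s0 (by omega) H (rev.length - s0) 1 le_rfl (by omega)
        (fun e he r hr _ => by
          obtain ⟨hne, _, _, hsnd⟩ := candKey_some rev e.1 r hr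
          have : 0 < e.1.toList.length := List.length_pos_iff.mpr hne
          omega)
        hex
      have hc1 : (s0 : Int) + 1 = (s0 : Int) + ((1 : Nat) : Int) := by norm_num
      rw [hc1, hrow]
      obtain ⟨e, he, r, hr, _⟩ := hex
      have hnn := bfold_ne_none rev nd e he (r, e.2)
        (by rw [cand_eq, hr]; rfl)
      cases hb : bfold rev nd with
      | none => exact absurd hb hnn
      | some x => rfl
    · -- no key ends here: the whole row misses
      have hnone : hitKeys nd
          ((PySem.List.pyRange ((s0 : Int) + 1) ((rev.length : Int) + 1) 1).map
            (fun e => (PySem.List.slice rev (some (s0 : Int)) (some e)).reverse)) = none := by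
        apply hitKeys_none
        intro k hk
        rw [List.mem_map] at hk
        obtain ⟨ei, hei, rfl⟩ := hk
        rw [PySem.List.mem_pyRange_one] at hei
        cases hg : PySem.Dict.get? ⟨nd⟩
            (String.ofList (PySem.List.slice rev (some (s0 : Int)) (some ei)).reverse) with
        | none => rfl
        | some v =>
          exfalso
          obtain ⟨len0, hlen0⟩ : ∃ len0 : Nat, ei = (s0 : Int) + (len0 : Int) ∧ 1 ≤ len0 := by
            refine ⟨(ei - s0).toNat, by omega, by omega⟩
          obtain ⟨hei_eq, hlp⟩ := hlen0
          rw [hei_eq, slice_key rev s0 len0] at hg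
          set k0 := String.ofList ((rev.drop s0).take len0).reverse with hk0
          have hmem := get?_mem nd k0 v hg
          have hlenk : k0.toList = ((rev.drop s0).take len0).reverse := String.toList_ofList
          have hkne : k0.toList ≠ [] := by
            rw [hlenk]
            simp only [ne_eq, List.reverse_eq_nil_iff, List.take_eq_nil_iff, List.drop_eq_nil_iff]
            omega
          have hprefix : k0.toList.reverse <+: rev.drop s0 := by
            rw [hlenk, List.reverse_reverse]; exact List.take_prefix _ _
          have hfle := find_le_of_prefix_drop rev k0.toList.reverse s0 hprefix
          have hf0 : 0 ≤ PySem.Chars.find rev k0.toList.reverse := by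
            rw [PySem.Chars.find_nonneg_iff]
            exact (List.IsPrefix.isInfix hprefix).trans (List.drop_suffix s0 rev).isInfix
          have hck : candKey rev k0 =
              some (PySem.Chars.find rev k0.toList.reverse, (k0.toList.length : Int)) := by
            simp only [candKey, if_neg hkne, if_pos hf0]
          have hfge := H (k0, v) hmem _ hck
          simp only at hfge
          exact hex ⟨(k0, v), hmem, _, hck, le_antisymm hfle hfge⟩
      rw [hnone]
      have hc1 : (s0 : Int) + 1 = ((s0 + 1 : Nat) : Int) := by push_cast; ring
      rw [hc1]
      apply ih (s0 + 1) (by omega)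
      intro e he r hr
      have hge := H e he r hr
      by_cases h : r.1 = (s0 : Int)
      · exact absurd ⟨e, he, r, hr, h⟩ hex
      · push_cast; omega

-- ===== VERDICT (by name: the statement is the Claim_ definition above) =====
theorem find_right_number_spec : Claim_equal_find_right_number := by
  intro line nd _
  unfold Spec_find_right_number
  have halt : find_right_number_alt line nd = (bfold line.toList.reverse nd).map (·.2) := by
    unfold find_right_number_alt
    cases hb : List.foldl (pyB_step line.toList.reverse) none nd with
    | none => simp [bfold, hb]
    | some x => rcases x with ⟨r, v⟩; simp [bfold, hb]
  have h := outer_loop line.toList.reverse nd line.toList.reverse.length 0 (by omega)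
    (fun e he r hr => (candKey_some _ _ _ hr).2.2.1)
  simp only [Nat.cast_zero] at h
  rw [halt, ← h]
  rfl
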